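-- pv_equiv track=rewrite | github.com/dragon1086/telegram-ai-org | core/telegram_formatting.py | _convert_blockquotes
-- ===== SOURCE A (Python) =====
-- def _convert_blockquotes(text: str) -> str:
--     """HTML 이스케이프 후 &gt; 로 시작하는 줄을 <blockquote> 태그로 변환한다.
--
--     연속된 blockquote 줄은 하나의 <blockquote> 블록으로 병합한다.
--     빈 &gt; 줄(내용 없는 blockquote)도 빈 줄로 처리한다.
--     <pre> 블록 내부의 &gt; 줄은 blockquote로 변환하지 않는다
--     (Telegram HTML은 <pre> 를 <blockquote> 안에 중첩 허용하지 않음).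
--     """
--     lines = text.split("\n")
--     result: list[str] = []
--     bq_lines: list[str] = []
--     in_pre = False  # <pre> 블록 내부 추적
--
--     def _flush() -> None:
--         if bq_lines:
--             content = "\n".join(bq_lines)
--             result.append(f"<blockquote>{content}</blockquote>")
--             bq_lines.clear()
--
--     for line in lines:
--         # <pre> 블록 진입 감지 (아직 pre 안에 있지 않을 때)
--         if not in_pre and "<pre" in line:
--             _flush()
--             result.append(line)
--             # 같은 줄에서 닫히지 않으면 multi-line pre 모드 진입
--             if "</pre>" not in line:
--                 in_pre = True
--             continue
--
--         # <pre> 블록 내부: blockquote 변환 없이 그대로 출력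
--         if in_pre:
--             result.append(line)
--             if "</pre>" in line:
--                 in_pre = False
--             continue
--
--         if line.startswith("&gt; ") or line == "&gt;":
--             bq_lines.append(line[5:] if line.startswith("&gt; ") else "")
--         else:
--             _flush()
--             result.append(line)
--     _flush()
--     return "\n".join(result)
-- ===== SOURCE B (Python) =====
-- from itertools import groupby
--
--
-- def _convert_blockquotes(text: str) -> str:
--     # Pass 1: tag every line with its kind, tracking the <pre> state machine.
--     tags = []
--     in_pre = False
--     for line in text.split("\n"):
--         if in_pre:
--             tags.append(("pre", line))
--             if "</pre>" in line:
--                 in_pre = False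
--         elif "<pre" in line:
--             tags.append(("pre", line))
--             if "</pre>" not in line:
--                 in_pre = True
--         elif line.startswith("&gt; ") or line == "&gt;":
--             tags.append(("bq", line[5:]))
--         else:
--             tags.append(("plain", line))
--     # Pass 2: each maximal run of 'bq' becomes one <blockquote>; rest passes through.
--     out = []
--     for kind, group in groupby(tags, key=lambda t: t[0]):
--         payloads = [p for _, p in group]
--         if kind == "bq":
--             out.append("<blockquote>" + "\n".join(payloads) + "</blockquote>")
--         else:
--             out.extend(payloads)
--     return "\n".join(out)
-- ===== Notes on version B (the rewrite author's own statement) =====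
-- stated objective: alternative
-- what changed: A's single loop with a mutable blockquote accumulator and inline flushes is replaced by a two-pass classify-then-group pipeline: pass 1 tags every line as pre/bq/plain via the same in_pre state machine, pass 2 uses itertools.groupby to merge each maximal bq run into one <blockquote> block.
import Mathlib
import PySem

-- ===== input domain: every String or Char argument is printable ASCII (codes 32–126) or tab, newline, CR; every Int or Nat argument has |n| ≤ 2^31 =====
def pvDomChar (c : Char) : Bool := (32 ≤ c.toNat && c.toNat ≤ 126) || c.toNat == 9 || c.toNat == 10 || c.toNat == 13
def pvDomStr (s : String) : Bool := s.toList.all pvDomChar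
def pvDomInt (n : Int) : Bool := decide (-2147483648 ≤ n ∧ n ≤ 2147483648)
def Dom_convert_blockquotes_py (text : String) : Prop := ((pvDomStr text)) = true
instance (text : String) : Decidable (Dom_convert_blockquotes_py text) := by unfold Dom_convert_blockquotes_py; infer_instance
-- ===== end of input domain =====

-- B replaces A's inline accumulator+flush loop by a classify-then-group decomposition
-- (tag each line once, then merge maximal blockquote runs); objective: alternative, same cost.


-- ===== PORT A =====
-- _flush(): append "<blockquote>…</blockquote>" to result if bq_lines nonempty, clear bq_lines
def pvFlushA (result bq : List String) : List String :=
  if bq ≠ [] then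
    result ++ ["<blockquote>" ++ PySem.Str.join "\n" bq ++ "</blockquote>"]
  else result

-- the 'for line in lines' loop, state (result, bq_lines, in_pre); [] case = final _flush()
def pvLoopA : List String → List String → List String → Bool → List String
  | [], result, bq, _ => pvFlushA result bq
  | line :: rest, result, bq, in_pre =>
    if !in_pre && PySem.Str.isIn "<pre" line then
      pvLoopA rest (pvFlushA result bq ++ [line]) []
        (if !(PySem.Str.isIn "</pre>" line) then true else in_pre)
    else if in_pre then
      pvLoopA rest (result ++ [line]) bq
        (if PySem.Str.isIn "</pre>" line then false else in_pre)
    else if PySem.Str.startswith line "&gt; " || line == "&gt;" then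
      pvLoopA rest result
        (bq ++ [if PySem.Str.startswith line "&gt; " then PySem.Str.slice line (some 5) none else ""])
        in_pre
    else
      pvLoopA rest (pvFlushA result bq ++ [line]) [] in_pre

def convert_blockquotes_py (text : String) : String :=
  -- sep "\n" is nonempty, so split? is always some
  PySem.Str.join "\n" (pvLoopA ((PySem.Str.split? text "\n").getD []) [] [] false)

-- ===== PORT B =====
-- pass 1 of Source B: tag each line ("pre" / "bq" / "plain", payload), tracking in_pre
def pvTagB : List String → Bool → List (String × String)
  | [], _ => []
  | line :: rest, in_pre =>
    if in_pre then
      ("pre", line) :: pvTagB rest (if PySem.Str.isIn "</pre>" line then false else in_pre)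
    else if PySem.Str.isIn "<pre" line then
      ("pre", line) :: pvTagB rest (!(PySem.Str.isIn "</pre>" line))
    else if PySem.Str.startswith line "&gt; " || line == "&gt;" then
      ("bq", PySem.Str.slice line (some 5) none) :: pvTagB rest in_pre
    else
      ("plain", line) :: pvTagB rest in_pre

-- itertools.groupby(tags, key=t[0]) with the payload list of each group
def pvGroupB : List (String × String) → List (String × List String)
  | [] => []
  | (k, p) :: ts =>
    (k, p :: (ts.takeWhile (fun t => t.1 == k)).map (·.2)) ::
      pvGroupB (ts.dropWhile (fun t => t.1 == k))
  termination_by ts => ts.length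
  decreasing_by simp only [List.length_cons]; exact Nat.lt_succ_of_le (List.length_dropWhile_le _ _)

-- pass 2 of Source B: each 'bq' run becomes one blockquote; other payloads pass through
def pvRenderB (groups : List (String × List String)) : List String :=
  groups.foldl
    (fun acc g =>
      if g.1 == "bq" then
        acc ++ ["<blockquote>" ++ PySem.Str.join "\n" g.2 ++ "</blockquote>"]
      else acc ++ g.2)
    []

def convert_blockquotes_py_alt (text : String) : String :=
  PySem.Str.join "\n" (pvRenderB (pvGroupB (pvTagB ((PySem.Str.split? text "\n").getD []) false)))

-- ===== PRECONDITION & SPEC =====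



-- ===== PRECONDITION & SPEC =====
def Spec_convert_blockquotes_py (text : String) (out : String) : Prop := out = convert_blockquotes_py_alt text
instance (text : String) (out : String) : Decidable (Spec_convert_blockquotes_py text out) := by unfold Spec_convert_blockquotes_py; infer_instance

-- ===== CLAIM (what is proved, stated in full; the proofs are below) =====
def Claim_equal_convert_blockquotes_py : Prop := ∀ (text : String), Dom_convert_blockquotes_py text → Spec_convert_blockquotes_py text (convert_blockquotes_py text)

-- ===== LEMMAS AND PROOFS =====

-- shared semantics of both programs: the pending blockquote payloads bq, then the tagged tail
def pvPend (bq : List String) : List (String × String) → List String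
  | [] => pvFlushA [] bq
  | (k, p) :: ts =>
    if k == "bq" then pvPend (bq ++ [p]) ts
    else pvFlushA [] bq ++ p :: pvPend [] ts

theorem pvFlushA_eq (result bq : List String) :
    pvFlushA result bq = result ++ pvFlushA [] bq := by
  unfold pvFlushA; split <;> simp

theorem pvLoopA_eq : ∀ (lines result bq : List String) (in_pre : Bool),
    (in_pre = true → bq = []) →
    pvLoopA lines result bq in_pre = result ++ pvPend bq (pvTagB lines in_pre) := by
  intro lines
  induction lines with
  | nil => intro result bq in_pre _; simp [pvLoopA, pvTagB, pvPend, pvFlushA_eq result bq]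
  | cons line rest ih =>
    intro result bq in_pre hinv
    cases in_pre with
    | true =>
      have hbq : bq = [] := hinv rfl
      subst hbq
      rw [show pvLoopA (line :: rest) result [] true
            = pvLoopA rest (result ++ [line]) []
                (if PySem.Str.isIn "</pre>" line then false else true) from by
          simp [pvLoopA]]
      rw [show pvTagB (line :: rest) true
            = ("pre", line) :: pvTagB rest (if PySem.Str.isIn "</pre>" line then false else true) from by
          simp [pvTagB]]
      rw [ih _ _ _ (by intro h; rfl)]
      simp [pvPend, pvFlushA]
    | false =>
      by_cases hpre : PySem.Str.isIn "<pre" line = true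
      · have hpre' : PySem.Chars.isIn ['<','p','r','e'] line.toList = true := by simpa using hpre
        rw [show pvLoopA (line :: rest) result bq false
              = pvLoopA rest (pvFlushA result bq ++ [line]) []
                  (if !(PySem.Str.isIn "</pre>" line) then true else false) from by
            simp [pvLoopA, hpre']]
        rw [show pvTagB (line :: rest) false
              = ("pre", line) :: pvTagB rest (!(PySem.Str.isIn "</pre>" line)) from by
            simp [pvTagB, hpre']]
        rw [ih _ _ _ (by intro h; rfl)]
        rw [pvFlushA_eq result bq]
        cases h2 : PySem.Str.isIn "</pre>" line <;> simp [pvPend, pvFlushA]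
      · have hpre' : PySem.Chars.isIn ['<','p','r','e'] line.toList = false := by
          simpa using hpre
        by_cases hbq : (PySem.Str.startswith line "&gt; " || line == "&gt;") = true
        · have hbq' : PySem.Chars.startswith line.toList ['&','g','t',';',' '] = true ∨ line = "&gt;" := by
            simpa using hbq
          have hp : (if PySem.Chars.startswith line.toList ['&','g','t',';',' '] = true
                then PySem.Str.slice line (some 5) none else "")
              = PySem.Str.slice line (some 5) none := by
            cases hs : PySem.Chars.startswith line.toList ['&','g','t',';',' '] with
            | true => rfl
            | false =>
              have hl : line = "&gt;" := by
                rcases hbq' with h | h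
                · rw [hs] at h; cases h
                · exact h
              subst hl; rfl
          rw [show pvLoopA (line :: rest) result bq false
                = pvLoopA rest result
                    (bq ++ [if PySem.Chars.startswith line.toList ['&','g','t',';',' '] = true
                        then PySem.Str.slice line (some 5) none else ""]) false from by
              simp [pvLoopA, hpre', hbq']
              rfl]
          rw [show pvTagB (line :: rest) false
                = ("bq", PySem.Str.slice line (some 5) none) :: pvTagB rest false from by
              simp [pvTagB, hpre', hbq']]
          rw [hp, ih _ _ _ (by intro h; cases h)]
          simp [pvPend]
        · have hbq' : ¬(PySem.Chars.startswith line.toList ['&','g','t',';',' '] = true ∨ line = "&gt;") := by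
            simpa using hbq
          rw [show pvLoopA (line :: rest) result bq false
                = pvLoopA rest (pvFlushA result bq ++ [line]) [] false from by
              simp [pvLoopA, hpre', hbq']]
          rw [show pvTagB (line :: rest) false
                = ("plain", line) :: pvTagB rest false from by
              simp [pvTagB, hpre', hbq']]
          rw [ih _ _ _ (by intro h; cases h)]
          rw [pvFlushA_eq result bq]
          simp [pvPend]

theorem pvPend_bq_run : ∀ (s : List (String × String)) (bq : List String) (rest : List (String × String)),
    (∀ t ∈ s, t.1 = "bq") →
    pvPend bq (s ++ rest) = pvPend (bq ++ s.map (·.2)) rest := by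
  intro s
  induction s with
  | nil => intro bq rest _; simp
  | cons t ts ih =>
    intro bq rest h
    obtain ⟨k, p⟩ := t
    have hk : k = "bq" := h (k, p) (by simp)
    subst hk
    rw [List.cons_append,
      show pvPend bq (("bq", p) :: (ts ++ rest)) = pvPend (bq ++ [p]) (ts ++ rest) from by
        simp [pvPend]]
    rw [ih _ _ (fun t ht => h t (by simp [ht]))]
    simp

theorem pvPend_pass_run : ∀ (s : List (String × String)) (rest : List (String × String)),
    (∀ t ∈ s, t.1 ≠ "bq") →
    pvPend [] (s ++ rest) = s.map (·.2) ++ pvPend [] rest := by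
  intro s
  induction s with
  | nil => intro rest _; simp
  | cons t ts ih =>
    intro rest h
    obtain ⟨k, p⟩ := t
    have hk : k ≠ "bq" := h (k, p) (by simp)
    rw [List.cons_append,
      show pvPend [] ((k, p) :: (ts ++ rest)) = pvFlushA [] [] ++ p :: pvPend [] (ts ++ rest) from by
        simp [pvPend, hk]]
    rw [ih _ (fun t ht => h t (by simp [ht]))]
    simp [pvFlushA]

theorem pvPend_flush (bq : List String) (rest : List (String × String))
    (h : ∀ k p ts, rest = (k, p) :: ts → k ≠ "bq") :
    pvPend bq rest = pvFlushA [] bq ++ pvPend [] rest := by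
  cases rest with
  | nil => simp [pvPend, pvFlushA]
  | cons t ts =>
    obtain ⟨k, p⟩ := t
    have hk : k ≠ "bq" := h k p ts rfl
    simp [pvPend, hk, pvFlushA]

theorem pvRenderB_eq : ∀ (n : Nat) (ts : List (String × String)), ts.length ≤ n →
    ∀ (acc : List String),
    (pvGroupB ts).foldl
      (fun acc g =>
        if g.1 == "bq" then
          acc ++ ["<blockquote>" ++ PySem.Str.join "\n" g.2 ++ "</blockquote>"]
        else acc ++ g.2) acc
      = acc ++ pvPend [] ts := by
  intro n
  induction n with
  | zero =>
    intro ts hts acc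
    have : ts = [] := List.eq_nil_of_length_eq_zero (Nat.le_zero.mp hts)
    subst this; simp [pvGroupB, pvPend, pvFlushA]
  | succ n ih =>
    intro ts hts acc
    cases ts with
    | nil => simp [pvGroupB, pvPend, pvFlushA]
    | cons t ts' =>
      obtain ⟨k, p⟩ := t
      simp only [pvGroupB, List.foldl_cons]
      have hsplit : ts' = ts'.takeWhile (fun t => t.1 == k) ++ ts'.dropWhile (fun t => t.1 == k) :=
        (List.takeWhile_append_dropWhile).symm
      have htk : ∀ t ∈ ts'.takeWhile (fun t => t.1 == k), t.1 = k := by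
        intro t ht
        exact eq_of_beq (List.mem_takeWhile_imp (p := fun (t : String × String) => t.1 == k) ht)
      have hlen : (ts'.dropWhile (fun t => t.1 == k)).length ≤ n := by
        have h1 := List.length_dropWhile_le (fun t : String × String => t.1 == k) ts'
        have h2 : ts'.length ≤ n := by simpa using Nat.le_of_succ_le_succ hts
        omega
      have hdrop : ∀ k' p' ds, ts'.dropWhile (fun t => t.1 == k) = (k', p') :: ds → k' ≠ k := by
        intro k' p' ds hd
        have hhead := List.head?_dropWhile_not (fun t : String × String => t.1 == k) ts'
        rw [hd] at hhead
        simpa using hhead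
      have hcons : ((k, p) :: ts') = ((k, p) :: ts'.takeWhile (fun t => t.1 == k))
          ++ ts'.dropWhile (fun t => t.1 == k) := by
        rw [List.cons_append]
        exact congrArg (List.cons (k, p)) hsplit
      rw [ih _ hlen]
      by_cases hk : k = "bq"
      · subst hk
        rw [if_pos (by rfl)]
        conv_rhs => rw [hcons]
        rw [pvPend_bq_run (("bq", p) :: ts'.takeWhile (fun t => t.1 == "bq")) []
              (ts'.dropWhile (fun t => t.1 == "bq"))
              (by
                intro t ht
                rcases List.mem_cons.mp ht with h | h
                · rw [h]
                · exact htk t h)]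
        conv_rhs => rw [pvPend_flush _ _ hdrop]
        simp [pvFlushA]
      · rw [if_neg (by simpa using hk)]
        conv_rhs => rw [hcons]
        rw [pvPend_pass_run ((k, p) :: ts'.takeWhile (fun t => t.1 == k)) _
              (by
                intro t ht
                rcases List.mem_cons.mp ht with h | h
                · rw [h]; simpa using hk
                · rw [htk t h]; exact hk)]
        simp

-- ===== VERDICT (by name: the statement is the Claim_ definition above) =====
theorem convert_blockquotes_py_spec : Claim_equal_convert_blockquotes_py := by
  intro text _
  unfold Spec_convert_blockquotes_py convert_blockquotes_py convert_blockquotes_py_alt pvRenderB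
  rw [pvLoopA_eq _ _ _ _ (fun h => rfl)]
  rw [pvRenderB_eq (pvTagB ((PySem.Str.split? text "\n").getD []) false).length _ le_rfl]
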